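-- pv_equiv track=rewrite | github.com/VladVynnytskyi/Codewars | 5kyu/Best travel.py | choose_best_sum
-- ===== SOURCE A (Python) =====
-- from itertools import combinations as comb
--
-- def choose_best_sum(t, k, ls):
--     res = 0
--     if len(ls) < k:
--         return
--     for com in comb(ls, k):
--         s = sum(com)
--         if s <= t and s > res:
--             res = s
--     if res == 0:
--         return
--     return res
-- ===== SOURCE B (Python) =====
-- def choose_best_sum(t, k, ls):
--     if k < 0 or k > len(ls):
--         return None
--     # DP over (number chosen, achievable sum): dp[j] = set of sums of j-element subsets
--     dp = [set() for _ in range(k + 1)]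
--     dp[0].add(0)
--     for x in ls:
--         for j in range(k, 0, -1):
--             dp[j] |= {s + x for s in dp[j - 1]}
--     cand = [s for s in dp[k] if 0 < s <= t]
--     return max(cand) if cand else None
-- ===== Notes on version B (the rewrite author's own statement) =====
-- stated objective: alternative
-- what changed: Replaces enumeration of all C(n,k) combinations with a bottom-up dynamic program over (number of elements chosen -> set of achievable sums), which collapses duplicate partial sums; Pre_ only excludes k < 0, where A raises ValueError.
import Mathlib
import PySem

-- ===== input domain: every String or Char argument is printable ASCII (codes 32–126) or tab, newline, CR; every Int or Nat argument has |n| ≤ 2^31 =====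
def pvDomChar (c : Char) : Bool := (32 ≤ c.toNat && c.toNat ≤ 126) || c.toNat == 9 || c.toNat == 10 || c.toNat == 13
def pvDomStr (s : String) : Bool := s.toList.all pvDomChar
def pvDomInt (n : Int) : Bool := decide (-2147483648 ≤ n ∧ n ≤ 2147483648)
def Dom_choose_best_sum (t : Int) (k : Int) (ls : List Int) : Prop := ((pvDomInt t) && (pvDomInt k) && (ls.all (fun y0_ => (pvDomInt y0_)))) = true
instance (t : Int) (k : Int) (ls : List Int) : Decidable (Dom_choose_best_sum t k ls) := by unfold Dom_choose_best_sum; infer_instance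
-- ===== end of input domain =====

-- B replaces A's exhaustive enumeration of all C(n,k) combinations by a bottom-up
-- dynamic program (number of elements chosen ↦ set of achievable sums); objective: alternative.


-- ===== PORT A =====
-- itertools.combinations(xs, n): combFold f xs n acc folds f over every n-element
-- combination of xs, in itertools' (streaming, lexicographic-by-index) order,
-- exactly as 'for com in comb(ls, k)' consumes the iterator
def combFold (f : Int → List Int → Int) : List Int → Nat → Int → Int
  | _, 0, acc => f acc []
  | [], _ + 1, acc => acc
  | x :: rest, n + 1, acc =>
      combFold f rest (n + 1) (combFold (fun a c => f a (x :: c)) rest n acc)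

def choose_best_sum (t : Int) (k : Int) (ls : List Int) : Option Int :=
  if (ls.length : Int) < k then none
  else
    let res := combFold
      (fun res com =>
        let s := com.sum
        if s ≤ t ∧ res < s then s else res) ls k.toNat 0
    if res = 0 then none else some res

-- ===== PORT B =====
-- one pass of B's inner loop: row j (j ≥ 1) becomes dp[j] |= {s + x for s in dp[j-1]}
def bGo (x : Int) (prev : PySem.Set Int) : List (PySem.Set Int) → List (PySem.Set Int)
  | [] => []
  | d :: rest => PySem.Set.update d (prev.map (fun s => s + x)) :: bGo x d rest

def bStep (x : Int) : List (PySem.Set Int) → List (PySem.Set Int)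
  | [] => []
  | d0 :: rest => d0 :: bGo x d0 rest

def choose_best_sum_alt (t : Int) (k : Int) (ls : List Int) : Option Int :=
  if k < 0 ∨ (ls.length : Int) < k then none
  else
    -- dp = [set() for _ in range(k+1)]; dp[0].add(0); for x in ls: (one bStep); then dp[k]
    match PySem.List.pyGet? (ls.foldl (fun d x => bStep x d)
        (PySem.Set.add PySem.Set.empty 0 :: List.replicate k.toNat PySem.Set.empty)) k with
    | none => none
    | some S => PySem.List.max? (S.filter (fun s => decide (0 < s ∧ s ≤ t))) (fun s => s)

-- ===== PRECONDITION & SPEC =====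
-- Pre_ excludes exactly k < 0, where A raises ValueError (combinations with negative r).
def Pre_choose_best_sum (t : Int) (k : Int) (ls : List Int) : Prop := 0 ≤ k
instance (t : Int) (k : Int) (ls : List Int) : Decidable (Pre_choose_best_sum t k ls) := by unfold Pre_choose_best_sum; infer_instance
def pvWitness_choose_best_sum : Int × Int × List Int := (10, 2, [1, 2, 3])

def Spec_choose_best_sum (t : Int) (k : Int) (ls : List Int) (out : Option Int) : Prop := out = choose_best_sum_alt t k ls
instance (t : Int) (k : Int) (ls : List Int) (out : Option Int) : Decidable (Spec_choose_best_sum t k ls out) := by unfold Spec_choose_best_sum; infer_instance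

-- ===== CLAIM (what is proved, stated in full; the proofs are below) =====
def Claim_equal_choose_best_sum : Prop := ∀ (t : Int) (k : Int) (ls : List Int), Dom_choose_best_sum t k ls → Pre_choose_best_sum t k ls → Spec_choose_best_sum t k ls (choose_best_sum t k ls)

-- ===== LEMMAS AND PROOFS =====

-- proof-side only: the list of n-element combinations combFold enumerates
def pyCombs : List Int → Nat → List (List Int)
  | _, 0 => [[]]
  | [], _ + 1 => []
  | x :: rest, n + 1 => (pyCombs rest n).map (fun c => x :: c) ++ pyCombs rest (n + 1)


theorem length_bGo (x : Int) (prev : PySem.Set Int) (l : List (PySem.Set Int)) :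
    (bGo x prev l).length = l.length := by
  induction l generalizing prev with
  | nil => rfl
  | cons d rest ih => simp [bGo, ih]

theorem length_bStep (x : Int) (l : List (PySem.Set Int)) :
    (bStep x l).length = l.length := by
  cases l with
  | nil => rfl
  | cons d rest => simp [bStep, length_bGo]

theorem length_foldl_bStep (ls : List Int) (dp : List (PySem.Set Int)) :
    (ls.foldl (fun d x => bStep x d) dp).length = dp.length := by
  induction ls generalizing dp with
  | nil => rfl
  | cons x rest ih => simp [List.foldl_cons, ih, length_bStep]

theorem mem_bGo (x : Int) (prev : PySem.Set Int) (l : List (PySem.Set Int)) (j : Nat) (s : Int) :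
    s ∈ (bGo x prev l).getD j [] ↔
      s ∈ l.getD j [] ∨ (j < l.length ∧ ∃ u ∈ (prev :: l).getD j [], s = u + x) := by
  induction l generalizing prev j with
  | nil => simp [bGo]
  | cons d rest ih =>
    cases j with
    | zero =>
      simp only [bGo, List.getD_cons_zero, List.length_cons]
      rw [PySem.Set.update_map_eq_foldl_add, PySem.Set.mem_foldl_add]
      constructor
      · rintro (h | ⟨u, hu, rfl⟩)
        · exact Or.inl h
        · exact Or.inr ⟨Nat.succ_pos _, u, hu, rfl⟩
      · rintro (h | ⟨-, u, hu, rfl⟩)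
        · exact Or.inl h
        · exact Or.inr ⟨u, hu, rfl⟩
    | succ j =>
      simp only [bGo, List.getD_cons_succ, List.length_cons]
      rw [ih, Nat.add_lt_add_iff_right]

theorem mem_bStep (x : Int) (dp : List (PySem.Set Int)) (j : Nat) (s : Int) :
    s ∈ (bStep x dp).getD j [] ↔
      s ∈ dp.getD j [] ∨ (0 < j ∧ j < dp.length ∧ ∃ u ∈ dp.getD (j - 1) [], s = u + x) := by
  cases dp with
  | nil => simp [bStep]
  | cons d0 rest =>
    cases j with
    | zero => simp [bStep]
    | succ j =>
      simp only [bStep, List.getD_cons_succ, List.length_cons]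
      rw [mem_bGo]
      constructor
      · rintro (h | ⟨hj, h⟩)
        · exact Or.inl h
        · exact Or.inr ⟨Nat.succ_pos _, by omega, by simpa using h⟩
      · rintro (h | ⟨-, hj, h⟩)
        · exact Or.inl h
        · exact Or.inr ⟨by omega, by simpa using h⟩

theorem pyCombs_nil (m : Nat) : pyCombs [] m = if m = 0 then [[]] else [] := by
  cases m <;> rfl

theorem mem_pyCombs_cons (m : Nat) (x : Int) (rest : List Int) (c : List Int) :
    c ∈ pyCombs (x :: rest) m ↔
      c ∈ pyCombs rest m ∨ ∃ n, m = n + 1 ∧ ∃ c' ∈ pyCombs rest n, c = x :: c' := by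
  cases m with
  | zero => simp [pyCombs]
  | succ n =>
    simp only [pyCombs, List.mem_append, List.mem_map]
    constructor
    · rintro (⟨c', hc', rfl⟩ | h)
      · exact Or.inr ⟨n, rfl, c', hc', rfl⟩
      · exact Or.inl h
    · rintro (h | ⟨n', hn, c', hc', rfl⟩)
      · exact Or.inr h
      · obtain rfl : n' = n := by omega
        exact Or.inl ⟨c', hc', rfl⟩

theorem mem_foldl_bStep (ls : List Int) (dp : List (PySem.Set Int)) (j : Nat) (s : Int)
    (hj : j < dp.length) :
    s ∈ (ls.foldl (fun d x => bStep x d) dp).getD j [] ↔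
      ∃ m, m ≤ j ∧ ∃ c ∈ pyCombs ls m, (s - c.sum) ∈ dp.getD (j - m) [] := by
  induction ls generalizing dp with
  | nil =>
    simp only [List.foldl_nil]
    constructor
    · intro h
      exact ⟨0, Nat.zero_le _, [], by simp [pyCombs_nil], by simpa using h⟩
    · rintro ⟨m, hm, c, hc, h⟩
      rw [pyCombs_nil] at hc
      by_cases hm0 : m = 0
      · subst hm0; simp at hc; subst hc; simpa using h
      · simp [hm0] at hc
  | cons x rest ih =>
    simp only [List.foldl_cons]
    rw [ih _ (by rw [length_bStep]; exact hj)]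
    constructor
    · rintro ⟨m, hm, c, hc, h⟩
      rw [mem_bStep] at h
      rcases h with h | ⟨hpos, _, u, hu, hux⟩
      · exact ⟨m, hm, c, (mem_pyCombs_cons _ _ _ _).2 (Or.inl hc), h⟩
      · refine ⟨m + 1, by omega, x :: c, (mem_pyCombs_cons _ _ _ _).2 (Or.inr ⟨m, rfl, c, hc, rfl⟩), ?_⟩
        have hidx : j - (m + 1) = j - m - 1 := by omega
        rw [hidx]
        have : s - (x :: c).sum = u := by simp at hux ⊢; omega
        rw [this]; exact hu
    · rintro ⟨m, hm, c, hc, h⟩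
      rw [mem_pyCombs_cons] at hc
      rcases hc with hc | ⟨n, rfl, c', hc', rfl⟩
      · refine ⟨m, hm, c, hc, ?_⟩
        rw [mem_bStep]
        exact Or.inl h
      · refine ⟨n, by omega, c', hc', ?_⟩
        rw [mem_bStep]
        refine Or.inr ⟨by omega, by omega, s - (x :: c').sum, ?_, by simp; omega⟩
        have : j - n - 1 = j - (n + 1) := by omega
        rw [this]; exact h

theorem getD_replicate_empty (n i : Nat) :
    (List.replicate n ([] : PySem.Set Int)).getD i [] = [] := by
  induction n generalizing i with
  | zero => simp
  | succ n ih =>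
    cases i with
    | zero => simp [List.replicate]
    | succ i => simp only [List.replicate, List.getD_cons_succ]; exact ih i

-- the final row k of the DP holds exactly the sums of the k-element combinations
theorem mem_final (ls : List Int) (kn : Nat) (s : Int) :
    s ∈ ((ls.foldl (fun d x => bStep x d)
        (PySem.Set.add PySem.Set.empty 0 :: List.replicate kn PySem.Set.empty)).getD kn []) ↔
      ∃ c ∈ pyCombs ls kn, s = c.sum := by
  have h0 : (PySem.Set.add PySem.Set.empty 0 : PySem.Set Int) = [0] := rfl
  rw [mem_foldl_bStep _ _ _ _ (by simp)]
  constructor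
  · rintro ⟨m, hm, c, hc, h⟩
    by_cases hmk : m = kn
    · subst hmk
      simp only [Nat.sub_self, List.getD_cons_zero, h0] at h
      simp at h
      exact ⟨c, hc, by omega⟩
    · have : kn - m = (kn - m - 1) + 1 := by omega
      rw [this, List.getD_cons_succ] at h
      rw [PySem.Set.empty] at h
      rw [getD_replicate_empty] at h
      simp at h
  · rintro ⟨c, hc, rfl⟩
    exact ⟨kn, le_refl _, c, hc, by simp⟩

theorem foldl_best_eq_foldl_max (t : Int) (L : List Int) (r0 : Int) :
    L.foldl (fun res s => if s ≤ t ∧ res < s then s else res) r0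
      = (L.filter (fun s => decide (s ≤ t))).foldl max r0 := by
  induction L generalizing r0 with
  | nil => rfl
  | cons s rest ih =>
    by_cases hs : s ≤ t
    · have hcond : (decide (s ≤ t)) = true := by simp [hs]
      simp only [List.foldl_cons, List.filter_cons, hcond, if_true]
      rw [ih]
      congr 1
      by_cases hr : r0 < s
      · rw [if_pos ⟨hs, hr⟩, max_eq_right hr.le]
      · rw [if_neg (by tauto), max_eq_left (by omega)]
    · have hcond : (decide (s ≤ t)) = false := by simp [hs]
      simp only [List.foldl_cons, List.filter_cons, hcond, Bool.false_eq_true, if_false]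
      have hstep : (if s ≤ t ∧ r0 < s then s else r0) = r0 := by simp [hs]
      rw [hstep, ih]

theorem combFold_eq_foldl (xs : List Int) (n : Nat) (f : Int → List Int → Int) (acc : Int) :
    combFold f xs n acc = (pyCombs xs n).foldl f acc := by
  induction xs generalizing n f acc with
  | nil => cases n <;> rfl
  | cons x rest ih =>
    cases n with
    | zero => rfl
    | succ n =>
      simp only [combFold, pyCombs, List.foldl_append, List.foldl_map]
      rw [ih _ _ _, ih _ _ _]

theorem choose_best_sum_eq_alt (t : Int) (k : Int) (ls : List Int) (hk : 0 ≤ k) :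
    choose_best_sum t k ls = choose_best_sum_alt t k ls := by
  have hA : choose_best_sum t k ls =
      (if (ls.length : Int) < k then none
       else if ((pyCombs ls k.toNat).foldl
           (fun res com => if com.sum ≤ t ∧ res < com.sum then com.sum else res) 0) = 0
         then none
         else some ((pyCombs ls k.toNat).foldl
           (fun res com => if com.sum ≤ t ∧ res < com.sum then com.sum else res) 0)) := by
    unfold choose_best_sum
    rw [combFold_eq_foldl]
  set dp : List (PySem.Set Int) := ls.foldl (fun d x => bStep x d)
      (PySem.Set.add PySem.Set.empty 0 :: List.replicate k.toNat PySem.Set.empty) with hdp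
  have hB : choose_best_sum_alt t k ls =
      (if k < 0 ∨ (ls.length : Int) < k then none
       else match PySem.List.pyGet? dp k with
       | none => none
       | some S => PySem.List.max? (S.filter (fun s => decide (0 < s ∧ s ≤ t))) (fun s => s)) := rfl
  have hlen : dp.length = k.toNat + 1 := by
    rw [hdp, length_foldl_bStep]; simp
  have hget : PySem.List.pyGet? dp k = some (dp.getD k.toNat []) := by
    have hcast : k = ((k.toNat : Nat) : Int) := by omega
    rw [hcast, PySem.List.pyGet?_natCast]
    rw [List.getElem?_eq_getElem (by omega), List.getD_eq_getElem?_getD,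
      List.getElem?_eq_getElem (by omega)]
    rfl
  rw [hA, hB, hget]
  simp only []
  set S := dp.getD k.toNat [] with hS
  have hmemS : ∀ s : Int, s ∈ S ↔ ∃ c ∈ pyCombs ls k.toNat, s = c.sum := by
    intro s; rw [hS, hdp]; exact mem_final ls k.toNat s
  set cand := S.filter (fun s => decide (0 < s ∧ s ≤ t)) with hcand
  have hmemCand : ∀ s : Int, s ∈ cand ↔ ((∃ c ∈ pyCombs ls k.toNat, s = c.sum) ∧ 0 < s ∧ s ≤ t) := by
    intro s
    rw [hcand, List.mem_filter]
    simp [hmemS]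
  by_cases hlt : (ls.length : Int) < k
  · -- both implementations return early
    rw [if_pos hlt, if_pos (Or.inr hlt)]
  · have hneg : ¬(k < 0 ∨ (ls.length : Int) < k) := by omega
    rw [if_neg hlt, if_neg hneg]
    have hfold :
        (pyCombs ls k.toNat).foldl
            (fun res com => if com.sum ≤ t ∧ res < com.sum then com.sum else res) 0
          = (((pyCombs ls k.toNat).map List.sum).filter (fun s => decide (s ≤ t))).foldl max 0 := by
      rw [← foldl_best_eq_foldl_max t, List.foldl_map]
    rw [hfold]
    set M := ((pyCombs ls k.toNat).map List.sum).filter (fun s => decide (s ≤ t)) with hM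
    set res := M.foldl max 0 with hres
    have hresMax : ∀ y ∈ M, y ≤ res := (PySem.List.le_foldl_max M 0).2
    have hres0 : (0 : Int) ≤ res := (PySem.List.le_foldl_max M 0).1
    have hmemM : ∀ s : Int, s ∈ M ↔ ((∃ c ∈ pyCombs ls k.toNat, s = c.sum) ∧ s ≤ t) := by
      intro s
      rw [hM, List.mem_filter]
      simp
      tauto
    by_cases hz : res = 0
    · rw [if_pos hz]
      have hcandnil : cand = [] := by
        by_contra h
        rcases List.exists_mem_of_ne_nil cand h with ⟨s, hs⟩
        rcases (hmemCand s).1 hs with ⟨hex, hpos, hle⟩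
        have hsM : s ∈ M := (hmemM s).2 ⟨hex, hle⟩
        have := hresMax s hsM
        omega
      rw [hcandnil]
      simp [PySem.List.max?]
    · rw [if_neg hz]
      have hresM : res ∈ M := by
        rcases PySem.List.foldl_max_mem M (0 : Int) with h | h
        · exact absurd (hres.trans h) hz
        · rw [hres]; exact h
      have hresCand : res ∈ cand := by
        rcases (hmemM res).1 hresM with ⟨hex, hle⟩
        exact (hmemCand res).2 ⟨hex, by omega, hle⟩
      cases hmax : PySem.List.max? cand (fun s => s) with
      | none =>
        rw [PySem.List.max?_eq_none_iff] at hmax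
        rw [hmax] at hresCand
        exact absurd hresCand (List.not_mem_nil)
      | some m =>
        have hmCand : m ∈ cand := PySem.List.max?_mem hmax
        have h1 : res ≤ m := PySem.List.max?_isMax hmax res hresCand
        have h2 : m ≤ res := by
          rcases (hmemCand m).1 hmCand with ⟨hex, _, hle⟩
          exact hresMax m ((hmemM m).2 ⟨hex, hle⟩)
        rw [le_antisymm h2 h1]

-- ===== VERDICT (by name: the statement is the Claim_ definition above) =====
theorem choose_best_sum_spec : Claim_equal_choose_best_sum := by
  intro t k ls _ hpre
  unfold Spec_choose_best_sum
  exact choose_best_sum_eq_alt t k ls hpre
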